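-- pv_equiv track=rewrite | github.com/vpoletae/prog_school_SB | Balanced_BST/Balanced_BST.py | order_array
-- ===== SOURCE A (Python) =====
-- def order_array(sorted_array):
--     if len(sorted_array) <= 2:
--         return sorted_array
--     index = int()
--     if len(sorted_array) % 2 == 0:
--         index = (len(sorted_array) // 2) - 1
--     else:
--         index = (len(sorted_array) // 2 + 1) - 1
--     return [sorted_array[index]] + order_array(sorted_array[:index]) + order_array(sorted_array[(index + 1):])
-- ===== SOURCE B (Python) =====
-- def order_array(sorted_array):
--     out = []
--     stack = [(0, len(sorted_array))]
--     while stack: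
--         lo, hi = stack.pop()
--         n = hi - lo
--         if n <= 2:
--             out += sorted_array[lo:hi]
--         else:
--             i = lo + (n // 2 - 1 if n % 2 == 0 else n // 2)
--             out.append(sorted_array[i])
--             stack.append((i + 1, hi))
--             stack.append((lo, i))
--     return out
-- ===== Notes on version B (the rewrite author's own statement) =====
-- stated objective: alternative
-- what changed: Replaced A's slice-and-concatenate recursion (which copies a subarray for every recursive call) with an iterative explicit-stack preorder traversal over (lo, hi) index ranges into the original list, appending to one output list.
import Mathlib
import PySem

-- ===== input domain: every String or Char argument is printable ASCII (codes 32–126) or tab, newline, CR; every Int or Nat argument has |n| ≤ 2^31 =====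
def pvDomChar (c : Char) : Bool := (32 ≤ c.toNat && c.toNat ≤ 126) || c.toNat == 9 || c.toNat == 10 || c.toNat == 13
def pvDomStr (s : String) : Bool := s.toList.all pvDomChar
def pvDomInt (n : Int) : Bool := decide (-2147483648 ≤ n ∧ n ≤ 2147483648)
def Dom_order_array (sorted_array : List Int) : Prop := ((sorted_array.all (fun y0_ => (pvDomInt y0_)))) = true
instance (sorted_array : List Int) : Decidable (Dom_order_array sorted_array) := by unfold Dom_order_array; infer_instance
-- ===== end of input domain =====

-- B iterates with an explicit stack of index ranges instead of A's slice-copying recursion;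
-- same return value everywhere (equal by value: A returns the input list object itself when len ≤ 2, B a fresh equal list).

-- ===== PORT A =====
-- A's recursion, with a fuel guard for structural totality only: fuel = sorted_array.length
-- always suffices (each recursive call strictly shrinks the list), so the 0-fuel branch is never reached.
-- When len > 2 the index is always in range (0 ≤ index < len), so Python's sorted_array[index]
-- never raises and pyGetD with default 0 is exact here.
def orderAux : Nat → List Int → List Int
  | 0, _ => []
  | fuel + 1, l =>
    if l.length ≤ 2 then l
    else
      let n : Int := (l.length : Int)
      let index : Int :=
        if PySem.Int.mod n 2 == 0 then PySem.Int.floordiv n 2 - 1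
        else (PySem.Int.floordiv n 2 + 1) - 1
      PySem.List.pyGetD l index 0 ::
        (orderAux fuel (PySem.List.slice l none (some index)) ++
         orderAux fuel (PySem.List.slice l (some (index + 1)) none))

def order_array (sorted_array : List Int) : List Int :=
  orderAux sorted_array.length sorted_array

-- ===== PORT B =====
-- root position inside a subrange of length n (the same even/odd formula both programs use)
def rootIdx (n : Nat) : Nat := if n % 2 == 0 then n / 2 - 1 else n / 2

-- the while loop of Source B: stack of (lo, hi) ranges (list head = top of stack), out = accumulated
-- output; fuel is a structural-totality guard only (each iteration strictly decreases
-- 2 * (sum of range lengths) + stack length, so fuel = 2*len+1 always suffices).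
def altLoop (xs : List Int) : Nat → List (Nat × Nat) → List Int → List Int
  | _, [], out => out
  | 0, _, out => out
  | fuel + 1, (lo, hi) :: st, out =>
    let n := hi - lo
    if n ≤ 2 then altLoop xs fuel st (out ++ (xs.drop lo).take n)
    else
      let i := lo + rootIdx n
      altLoop xs fuel ((lo, i) :: (i + 1, hi) :: st) (out ++ [xs.getD i 0])

def order_array_alt (sorted_array : List Int) : List Int :=
  altLoop sorted_array (2 * sorted_array.length + 1) [(0, sorted_array.length)] []

-- ===== PRECONDITION & SPEC =====
def Spec_order_array (sorted_array : List Int) (out : List Int) : Prop := out = order_array_alt sorted_array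
instance (sorted_array : List Int) (out : List Int) : Decidable (Spec_order_array sorted_array out) := by unfold Spec_order_array; infer_instance

-- ===== CLAIM (what is proved, stated in full; the proofs are below) =====
def Claim_equal_order_array : Prop := ∀ (sorted_array : List Int), Dom_order_array sorted_array → Spec_order_array sorted_array (order_array sorted_array)

-- ===== LEMMAS AND PROOFS =====

theorem rootIdx_lt {n : Nat} (h : 3 ≤ n) : rootIdx n < n := by
  unfold rootIdx; split <;> omega

theorem rootIdx_pos {n : Nat} (h : 3 ≤ n) : 1 ≤ rootIdx n := by
  unfold rootIdx; split
  · rename_i he; simp only [beq_iff_eq] at he; omega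
  · omega

theorem rootIdx_le {n : Nat} (h : 3 ≤ n) : rootIdx n ≤ n - 2 := by
  unfold rootIdx; split
  · omega
  · rename_i he; simp only [beq_iff_eq] at he; omega

-- A's index expression, as a Nat
theorem indexNat (len : Nat) (h : 3 ≤ len) :
    (if PySem.Int.mod (len : Int) 2 == 0 then PySem.Int.floordiv (len : Int) 2 - 1
     else (PySem.Int.floordiv (len : Int) 2 + 1) - 1) = ((rootIdx len : Nat) : Int) := by
  have h2 : (2 : Int) = ((2 : Nat) : Int) := rfl
  rw [h2, PySem.Int.mod_natCast, PySem.Int.floordiv_natCast]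
  unfold rootIdx
  by_cases hp : len % 2 = 0 <;> simp [hp] <;> omega

-- the fuel does not matter as long as it is at least the list length
theorem orderAux_fuel (f g : Nat) (l : List Int) (hf : l.length ≤ f) (hg : l.length ≤ g) :
    orderAux f l = orderAux g l := by
  induction f generalizing g l with
  | zero =>
    have : l = [] := by cases l <;> simp_all
    subst this
    cases g <;> simp [orderAux]
  | succ f ih =>
    cases g with
    | zero =>
      have : l = [] := by cases l <;> simp_all
      subst this
      simp [orderAux]
    | succ g =>
      rw [orderAux, orderAux]
      by_cases hl : l.length ≤ 2
      · rw [if_pos hl, if_pos hl]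
      · rw [if_neg hl, if_neg hl]
        simp only []
        rw [indexNat _ (by omega)]
        rw [PySem.List.slice_to_natCast,
            show ((rootIdx l.length : Nat) : Int) + 1 = ((rootIdx l.length + 1 : Nat) : Int) from by push_cast; ring,
            PySem.List.slice_from_natCast]
        have hr := rootIdx_lt (n := l.length) (by omega)
        rw [ih (l.take (rootIdx l.length)) (g := g) (by simp; omega) (by simp; omega),
            ih (l.drop (rootIdx l.length + 1)) (g := g) (by simp; omega) (by simp; omega)]

theorem orderA_small {l : List Int} (h : l.length ≤ 2) : order_array l = l := by
  unfold order_array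
  cases l with
  | nil => simp [orderAux]
  | cons a t => rw [List.length_cons, orderAux, if_pos (by simpa using h)]

theorem orderA_step {l : List Int} (h : ¬ l.length ≤ 2) :
    order_array l = l.getD (rootIdx l.length) 0 ::
      (order_array (l.take (rootIdx l.length)) ++ order_array (l.drop (rootIdx l.length + 1))) := by
  unfold order_array
  obtain ⟨f, hf⟩ : ∃ f, l.length = f + 1 := ⟨l.length - 1, by omega⟩
  rw [hf, orderAux, if_neg (by omega)]
  simp only []
  rw [← hf, indexNat _ (by omega)]
  rw [PySem.List.slice_to_natCast,
      show ((rootIdx l.length : Nat) : Int) + 1 = ((rootIdx l.length + 1 : Nat) : Int) from by push_cast; ring,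
      PySem.List.slice_from_natCast, PySem.List.pyGetD_natCast]
  have hr := rootIdx_lt (n := l.length) (by omega)
  rw [orderAux_fuel f (l.take (rootIdx l.length)).length _ (by simp; omega) (le_refl _),
      orderAux_fuel f (l.drop (rootIdx l.length + 1)).length _ (by simp; omega) (le_refl _)]

theorem altLoop_nil (xs out : List Int) (f : Nat) : altLoop xs f [] out = out := by
  cases f <;> rw [altLoop]

theorem altLoop_cons_small {lo hi : Nat} (xs : List Int) (f : Nat) (st : List (Nat × Nat))
    (out : List Int) (h : hi - lo ≤ 2) :
    altLoop xs (f + 1) ((lo, hi) :: st) out = altLoop xs f st (out ++ (xs.drop lo).take (hi - lo)) := by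
  rw [altLoop]; simp [h]

theorem altLoop_cons_big {lo hi : Nat} (xs : List Int) (f : Nat) (st : List (Nat × Nat))
    (out : List Int) (h : ¬ hi - lo ≤ 2) :
    altLoop xs (f + 1) ((lo, hi) :: st) out =
      altLoop xs f ((lo, lo + rootIdx (hi - lo)) :: (lo + rootIdx (hi - lo) + 1, hi) :: st)
        (out ++ [xs.getD (lo + rootIdx (hi - lo)) 0]) := by
  rw [altLoop]; simp [h]

theorem loop_spec (xs : List Int) (f : Nat) (st : List (Nat × Nat)) (out : List Int)
    (hst : ∀ p ∈ st, p.2 ≤ xs.length)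
    (hf : 2 * (st.map (fun p => p.2 - p.1)).sum + st.length ≤ f) :
    altLoop xs f st out =
      out ++ (st.map (fun p => order_array ((xs.drop p.1).take (p.2 - p.1)))).flatten := by
  induction f generalizing st out with
  | zero =>
    have : st = [] := by cases st <;> simp_all
    subst this
    simp [altLoop_nil]
  | succ f ih =>
    cases st with
    | nil => simp [altLoop_nil]
    | cons p st =>
      obtain ⟨lo, hi⟩ := p
      simp only [List.map_cons, List.sum_cons, List.length_cons] at hf
      by_cases hle : hi - lo ≤ 2
      · rw [altLoop_cons_small xs f st out hle,
          ih st _ (fun p hp => hst p (List.mem_cons_of_mem _ hp)) (by omega),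
          List.map_cons, List.flatten_cons,
          orderA_small (l := (xs.drop lo).take (hi - lo)) (by simp; omega),
          List.append_assoc]
      · have h3 : 3 ≤ hi - lo := by omega
        have hhi : hi ≤ xs.length := hst (lo, hi) (by simp)
        have hr1 := rootIdx_pos h3
        have hr2 := rootIdx_le h3
        have hlen : ((xs.drop lo).take (hi - lo)).length = hi - lo := by simp; omega
        rw [altLoop_cons_big xs f st out hle,
            ih _ _ (by
              intro p hp
              simp only [List.mem_cons] at hp
              rcases hp with rfl | rfl | hp
              · simp only []; omega
              · exact hhi
              · exact hst p (List.mem_cons_of_mem _ hp))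
              (by simp only [List.map_cons, List.sum_cons, List.length_cons]; omega)]
        simp only [List.map_cons, List.flatten_cons]
        rw [orderA_step (l := List.take (hi - lo) (List.drop lo xs)) (by omega), hlen]
        have e1 : (List.take (hi - lo) (List.drop lo xs)).getD (rootIdx (hi - lo)) 0
            = xs.getD (lo + rootIdx (hi - lo)) 0 := by
          rw [List.getD_eq_getElem?_getD, List.getD_eq_getElem?_getD,
              List.getElem?_take_of_lt (rootIdx_lt h3), List.getElem?_drop]
        have e2 : (List.take (hi - lo) (List.drop lo xs)).take (rootIdx (hi - lo))
            = List.take (lo + rootIdx (hi - lo) - lo) (List.drop lo xs) := by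
          rw [List.take_take]
          congr 1
          omega
        have e3 : (List.take (hi - lo) (List.drop lo xs)).drop (rootIdx (hi - lo) + 1)
            = List.take (hi - (lo + rootIdx (hi - lo) + 1)) (List.drop (lo + rootIdx (hi - lo) + 1) xs) := by
          rw [List.drop_take, List.drop_drop,
            show hi - lo - (rootIdx (hi - lo) + 1) = hi - (lo + rootIdx (hi - lo) + 1) from by omega,
            show lo + (rootIdx (hi - lo) + 1) = lo + rootIdx (hi - lo) + 1 from by omega]
        rw [e1, e2, e3]
        simp [List.append_assoc]

-- ===== VERDICT (by name: the statement is the Claim_ definition above) =====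
theorem order_array_spec : Claim_equal_order_array := by
  intro xs _
  unfold Spec_order_array order_array_alt
  rw [loop_spec xs (2 * xs.length + 1) [(0, xs.length)] []
        (by intro p hp; simp at hp; simp [hp])
        (by simp)]
  simp [order_array]
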